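-- pv_equiv track=rewrite | github.com/mblanche/nextflow | docker/n50/n50.py | break_scaffold
-- ===== SOURCE A (Python) =====
-- def break_scaffold(seq):
--     i = 0
--     cur_contig_start = 0
--
--     while (i < len(seq)) and (seq.find("N", i) != -1):
--         start = seq.find("N", i)
--         end = start + 1
--         while (end != len(seq)) and (seq[end] == "N"):
--             end +=1
--
--         i = end + 1
--         if (end - start) >= 10:
--             if cur_contig_start != start:
--                 yield seq[cur_contig_start: start]
--             cur_contig_start = end
--     if len(seq[cur_contig_start: ]) != 0:
--         yield seq[cur_contig_start: ]
-- ===== SOURCE B (Python) =====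
-- from itertools import groupby
--
--
-- def break_scaffold(seq):
--     # Run-length view of the sequence: maximal runs of equal characters.
--     # A run of >= 10 'N's is a separator; everything else accumulates
--     # into the current contig.
--     cur = ""
--     for ch, grp in groupby(seq):
--         run = "".join(grp)
--         if ch == "N" and len(run) >= 10:
--             if cur:
--                 yield cur
--                 cur = ""
--         else:
--             cur += run
--     if cur:
--         yield cur
-- ===== Notes on version B (the rewrite author's own statement) =====
-- stated objective: alternative
-- what changed: A's manual two-pointer scan (repeated seq.find('N', i) plus an inner while extending the run, slicing out contigs by index) is replaced by a single itertools.groupby run-length pass: runs of >=10 'N' act as separators, all other runs are accumulated into the current contig.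
import Mathlib
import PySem

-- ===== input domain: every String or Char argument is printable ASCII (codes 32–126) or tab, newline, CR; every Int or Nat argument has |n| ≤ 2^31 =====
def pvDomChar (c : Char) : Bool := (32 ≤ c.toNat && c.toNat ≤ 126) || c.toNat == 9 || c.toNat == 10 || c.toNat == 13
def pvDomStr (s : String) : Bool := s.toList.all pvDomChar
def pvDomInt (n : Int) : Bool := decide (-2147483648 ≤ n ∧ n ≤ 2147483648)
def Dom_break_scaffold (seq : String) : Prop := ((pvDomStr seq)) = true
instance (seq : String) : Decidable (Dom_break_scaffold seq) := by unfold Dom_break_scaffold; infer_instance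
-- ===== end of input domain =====

-- B replaces A's two-pointer find/while index scan by a run-length (itertools.groupby) pass:
-- runs of ≥10 'N' are separators, other runs accumulate into the current contig. Alternative
-- decomposition, same O(n) cost; the equivalence is about the RETURN value (list of yields).

-- ===== PORT A =====
-- inner while loop: `while (end != len(seq)) and (seq[end] == "N"): end += 1`
-- (guard written as `e < s.length`: the loop is only entered with end ≤ len, where
--  `end != len` coincides with `end < len` and seq[end] never raises)
def pvNRunEnd (s : List Char) (e : Nat) : Nat :=
  if h : e < s.length then
    if s[e] = 'N' then pvNRunEnd s (e + 1) else e
  else e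
termination_by s.length - e

-- used only by the termination proof of pvBreakAux
theorem pvNRunEnd_ge (s : List Char) (e : Nat) : e ≤ pvNRunEnd s e := by
  unfold pvNRunEnd
  split
  · split
    · exact le_trans (Nat.le_succ e) (pvNRunEnd_ge s (e + 1))
    · exact le_refl e
  · exact le_refl e
termination_by s.length - e

-- outer while loop; state = (i, cur_contig_start)
def pvBreakAux (s : List Char) (i cur : Nat) : List String :=
  if hg : i < s.length ∧ PySem.Chars.findFrom s ['N'] (i : Int) none ≠ -1 then
    let start : Nat := (PySem.Chars.findFrom s ['N'] (i : Int) none).toNat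
    let e : Nat := pvNRunEnd s (start + 1)
    if 10 ≤ e - start then
      (if cur ≠ start then [String.ofList (PySem.List.slice s (some (cur : Int)) (some (start : Int)))] else [])
        ++ pvBreakAux s (e + 1) e
    else pvBreakAux s (e + 1) cur
  else
    if PySem.List.slice s (some (cur : Int)) none ≠ [] then
      [String.ofList (PySem.List.slice s (some (cur : Int)) none)]
    else []
termination_by s.length + 1 - i
decreasing_by
  all_goals
    have hk : i ≤ s.length := le_of_lt hg.1
    have hspec := PySem.Chars.findFrom_natCast_spec s ['N'] i hk hg.2
    have hstart : i ≤ (PySem.Chars.findFrom s ['N'] (i : Int) none).toNat := by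
      have := hspec.1; omega
    have he := pvNRunEnd_ge s ((PySem.Chars.findFrom s ['N'] (i : Int) none).toNat + 1)
    have := hg.1
    omega

def break_scaffold (seq : String) : List String := pvBreakAux seq.toList 0 0

-- ===== PORT B =====
-- itertools.groupby(seq): the run-length decomposition (char, run length)
def pvRle (t : List Char) : List (Char × Nat) :=
  match t with
  | [] => []
  | c :: cs => (c, (cs.takeWhile (· = c)).length + 1) :: pvRle (cs.dropWhile (· = c))
termination_by t.length
decreasing_by
  simp only [List.length_cons]
  exact Nat.lt_succ_of_le (List.length_dropWhile_le _ _)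

-- the for loop over groupby with accumulator cur (run = replicate n c)
def pvJoinAux (rs : List (Char × Nat)) (cur : List Char) : List String :=
  match rs with
  | [] => if cur ≠ [] then [String.ofList cur] else []
  | (c, n) :: rest =>
    if c = 'N' ∧ 10 ≤ n then
      (if cur ≠ [] then [String.ofList cur] else []) ++ pvJoinAux rest []
    else pvJoinAux rest (cur ++ List.replicate n c)

def break_scaffold_alt (seq : String) : List String := pvJoinAux (pvRle seq.toList) []

-- ===== PRECONDITION & SPEC =====
def Spec_break_scaffold (seq : String) (out : List String) : Prop := out = break_scaffold_alt seq
instance (seq : String) (out : List String) : Decidable (Spec_break_scaffold seq out) := by unfold Spec_break_scaffold; infer_instance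

-- ===== CLAIM (what is proved, stated in full; the proofs are below) =====
def Claim_equal_break_scaffold : Prop := ∀ (seq : String), Dom_break_scaffold seq → Spec_break_scaffold seq (break_scaffold seq)

-- ===== LEMMAS AND PROOFS =====

-- reference splitter both ports are reduced to: walk the characters with the pending contig p
def pvSpec (p : List Char) (rest : List Char) : List String :=
  match rest with
  | [] => if p = [] then [] else [String.ofList p]
  | c :: cs =>
    if h : 10 ≤ ((c :: cs).takeWhile (· = 'N')).length then
      (if p = [] then [] else [String.ofList p]) ++ pvSpec [] ((c :: cs).dropWhile (· = 'N'))
    else pvSpec (p ++ [c]) cs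
termination_by rest.length
decreasing_by
  · have hc : c = 'N' := by
      by_contra hc
      simp [hc] at h
    subst hc
    simp only [List.dropWhile_cons, decide_true, if_true, List.length_cons]
    exact Nat.lt_succ_of_le (List.length_dropWhile_le _ _)
  · simp

theorem pvSpec_nil (p : List Char) : pvSpec p [] = if p = [] then [] else [String.ofList p] := by
  rw [pvSpec]

theorem pvSpec_cons (p : List Char) (c : Char) (cs : List Char) :
    pvSpec p (c :: cs) =
      if 10 ≤ ((c :: cs).takeWhile (· = 'N')).length then
        (if p = [] then [] else [String.ofList p]) ++ pvSpec [] ((c :: cs).dropWhile (· = 'N'))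
      else pvSpec (p ++ [c]) cs := by
  rw [pvSpec]
  by_cases h : 10 ≤ ((c :: cs).takeWhile (· = 'N')).length <;> simp [h]

theorem pvPrefixSingleton (l : List Char) (c : Char) : [c] <+: l ↔ l.head? = some c := by
  cases l <;> simp [List.cons_prefix_iff]

theorem pvTakeDropN (u cs : List Char) (hu : ∀ x ∈ u, x = 'N') (hcs : cs.head? ≠ some 'N') :
    (u ++ cs).takeWhile (· = 'N') = u ∧ (u ++ cs).dropWhile (· = 'N') = cs := by
  induction u with
  | nil =>
    simp only [List.nil_append]
    cases cs with
    | nil => simp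
    | cons c cs' =>
      have hc : c ≠ 'N' := by simpa using hcs
      simp [List.takeWhile_cons, List.dropWhile_cons, hc]
  | cons a u ih =>
    have ha : a = 'N' := hu a (by simp)
    have ih' := ih (fun x hx => hu x (by simp [hx]))
    subst ha
    simp [List.takeWhile_cons, List.dropWhile_cons, ih'.1, ih'.2]

theorem pvSpec_step_nonN (p : List Char) (c : Char) (cs : List Char) (h : c ≠ 'N') :
    pvSpec p (c :: cs) = pvSpec (p ++ [c]) cs := by
  have hc : ((c :: cs).takeWhile (· = 'N')).length = 0 := by
    simp [List.takeWhile_cons, h]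
  rw [pvSpec_cons, if_neg (by omega)]

theorem pvSpec_step_chunk (p w cs : List Char) (h : ∀ x ∈ w, x ≠ 'N') :
    pvSpec p (w ++ cs) = pvSpec (p ++ w) cs := by
  induction w generalizing p with
  | nil => simp
  | cons a w ih =>
    have ha : a ≠ 'N' := h a (by simp)
    rw [List.cons_append, pvSpec_step_nonN _ _ _ ha, ih _ (fun x hx => h x (by simp [hx]))]
    have : (p ++ [a]) ++ w = p ++ (a :: w) := by simp
    rw [this]

theorem pvSpec_step_shortN (p u cs : List Char) (hu : ∀ x ∈ u, x = 'N')
    (hlen : u.length < 10) (hcs : cs.head? ≠ some 'N') :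
    pvSpec p (u ++ cs) = pvSpec (p ++ u) cs := by
  induction u generalizing p with
  | nil => simp
  | cons a u ih =>
    have ha : a = 'N' := hu a (by simp)
    subst ha
    have htd := pvTakeDropN ('N' :: u) cs hu hcs
    rw [List.cons_append, pvSpec_cons, if_neg]
    · rw [ih _ (fun x hx => hu x (by simp [hx])) (by simp at hlen ⊢; omega)]
      have : (p ++ ['N']) ++ u = p ++ ('N' :: u) := by simp
      rw [this]
    · rw [List.cons_append] at htd
      rw [htd.1]
      simp at hlen ⊢
      omega

theorem pvSpec_qualify (p u cs : List Char) (hu : ∀ x ∈ u, x = 'N')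
    (hlen : 10 ≤ u.length) (hcs : cs.head? ≠ some 'N') :
    pvSpec p (u ++ cs) = (if p = [] then [] else [String.ofList p]) ++ pvSpec [] cs := by
  cases u with
  | nil => simp at hlen
  | cons a u =>
    have ha : a = 'N' := hu a (by simp)
    subst ha
    have htd := pvTakeDropN ('N' :: u) cs hu hcs
    rw [List.cons_append] at htd
    rw [List.cons_append, pvSpec_cons, if_pos, htd.2]
    rw [htd.1]
    simpa using hlen

theorem pvSpec_noN (p rest : List Char) (h : ∀ x ∈ rest, x ≠ 'N') :
    pvSpec p rest = if p ++ rest = [] then [] else [String.ofList (p ++ rest)] := by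
  induction rest generalizing p with
  | nil => rw [pvSpec_nil]; simp
  | cons c cs ih =>
    rw [pvSpec_step_nonN _ _ _ (h c (by simp)), ih _ (fun x hx => h x (by simp [hx]))]
    have : (p ++ [c]) ++ cs = p ++ (c :: cs) := by simp
    rw [this]

-- ===== B = pvSpec =====
theorem pvJoin_fuel (n : Nat) : ∀ (t p : List Char), t.length ≤ n →
    pvJoinAux (pvRle t) p = pvSpec p t := by
  induction n with
  | zero =>
    intro t p h
    have ht : t = [] := List.eq_nil_of_length_eq_zero (Nat.le_zero.mp h)
    subst ht
    rw [pvRle, pvSpec_nil]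
    by_cases hp : p = [] <;> simp [pvJoinAux, hp]
  | succ n ih =>
    intro t p h
    cases t with
    | nil =>
      rw [pvRle, pvSpec_nil]
      by_cases hp : p = [] <;> simp [pvJoinAux, hp]
    | cons c cs =>
      have hcs : cs.length ≤ n := by simp at h; omega
      have hall : ∀ x ∈ c :: cs.takeWhile (· = c), x = c := by
        intro x hx
        rcases List.mem_cons.mp hx with h' | h'
        · exact h'
        · simpa using List.mem_takeWhile_imp h'
      have hhead : (cs.dropWhile (· = c)).head? ≠ some c := by
        have hd := List.head?_dropWhile_not (· = c) cs
        intro hEq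
        rw [hEq] at hd
        simp at hd
      have htd : (c :: cs.takeWhile (· = c)) ++ cs.dropWhile (· = c) = c :: cs := by
        rw [List.cons_append, List.takeWhile_append_dropWhile]
      have hlen' : (cs.dropWhile (· = c)).length ≤ n :=
        le_trans (List.length_dropWhile_le _ _) hcs
      rw [pvRle]
      by_cases hq : c = 'N' ∧ 10 ≤ (cs.takeWhile (· = c)).length + 1
      · rw [pvJoinAux, if_pos hq, ih _ [] hlen']
        have hall' : ∀ x ∈ c :: cs.takeWhile (· = c), x = 'N' := by
          intro x hx; rw [hall x hx]; exact hq.1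
        have hhead' : (cs.dropWhile (· = c)).head? ≠ some 'N' := by rw [← hq.1]; exact hhead
        rw [← htd, pvSpec_qualify p _ _ hall' (by simpa using hq.2) hhead']
        by_cases hp : p = [] <;> simp [hp]
      · rw [pvJoinAux, if_neg hq, ih _ _ hlen']
        have hrep : List.replicate ((cs.takeWhile (· = c)).length + 1) c = c :: cs.takeWhile (· = c) :=
          (List.eq_replicate_iff.mpr ⟨by simp, hall⟩).symm
        rw [hrep, ← htd]
        by_cases hN : c = 'N'
        · have hshort : (c :: cs.takeWhile (· = c)).length < 10 := by
            have := (not_and.mp hq) hN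
            simp only [List.length_cons]
            omega
          rw [pvSpec_step_shortN p _ _ (fun x hx => by rw [hall x hx]; exact hN) hshort
            (by rw [← hN]; exact hhead)]
        · rw [pvSpec_step_chunk p _ _ (fun x hx => by rw [hall x hx]; exact hN)]

theorem pvJoin_eq_spec (t p : List Char) : pvJoinAux (pvRle t) p = pvSpec p t :=
  pvJoin_fuel t.length t p (le_refl _)

-- ===== A = pvSpec =====
theorem pvNRunEnd_le (s : List Char) (k : Nat) (h : k ≤ s.length) : pvNRunEnd s k ≤ s.length := by
  unfold pvNRunEnd
  split
  · split
    · exact pvNRunEnd_le s (k + 1) (by omega)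
    · exact h
  · exact h
termination_by s.length - k

theorem pvNRunEnd_N (s : List Char) (k j : Nat) (hj1 : k ≤ j) (hj2 : j < pvNRunEnd s k) :
    s[j]? = some 'N' := by
  unfold pvNRunEnd at hj2
  by_cases hk : k < s.length
  · rw [dif_pos hk] at hj2
    by_cases hN : s[k] = 'N'
    · rw [if_pos hN] at hj2
      rcases Nat.eq_or_lt_of_le hj1 with heq | hlt
      · subst heq
        rw [List.getElem?_eq_getElem hk, hN]
      · exact pvNRunEnd_N s (k + 1) j hlt hj2
    · rw [if_neg hN] at hj2
      omega
  · rw [dif_neg hk] at hj2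
    omega
termination_by s.length - k

theorem pvNRunEnd_stop (s : List Char) (k : Nat) (h : k ≤ s.length) :
    pvNRunEnd s k = s.length ∨ (pvNRunEnd s k < s.length ∧ s[pvNRunEnd s k]? ≠ some 'N') := by
  unfold pvNRunEnd
  split
  · split
    · next h1 h2 => exact pvNRunEnd_stop s (k + 1) (by omega)
    · next h1 h2 =>
      right
      refine ⟨h1, ?_⟩
      rw [List.getElem?_eq_getElem h1]
      intro hc
      exact h2 (by simpa using hc)
  · left; omega
termination_by s.length - k

theorem pvSegApp (s : List Char) (a b : Nat) (hab : a ≤ b) :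
    (s.drop a).take (b - a) ++ s.drop b = s.drop a := by
  by_cases hb : b ≤ s.length
  · have h1 : s.drop b = (s.drop a).drop (b - a) := by
      rw [List.drop_drop]
      congr 1
      omega
    rw [h1, List.take_append_drop]
  · have hd : s.drop b = [] := List.drop_eq_nil_of_le (i := b) (by omega)
    rw [hd, List.append_nil, List.take_of_length_le (by simp; omega)]

theorem pvSegTake (s : List Char) (a b c : Nat) (hab : a ≤ b) (hbc : b ≤ c) :
    (s.drop a).take (b - a) ++ (s.drop b).take (c - b) = (s.drop a).take (c - a) := by
  have h1 : s.drop b = (s.drop a).drop (b - a) := by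
    rw [List.drop_drop]
    congr 1
    omega
  rw [h1, show c - a = (b - a) + (c - b) by omega, List.take_add]

theorem pvBreak_exit (s : List Char) (i cur : Nat) (h1 : cur ≤ i)
    (hg : ¬(i < s.length ∧ PySem.Chars.findFrom s ['N'] (i : Int) none ≠ -1)) :
    pvBreakAux s i cur = pvSpec ((s.drop cur).take (i - cur)) (s.drop i) := by
  rw [pvBreakAux, dif_neg hg]
  have hnoN : ∀ x ∈ s.drop i, x ≠ 'N' := by
    intro x hx hxN
    subst hxN
    by_cases hi : i < s.length
    · have hf : PySem.Chars.findFrom s ['N'] (i : Int) none = -1 := by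
        by_contra hf
        exact hg ⟨hi, hf⟩
      have hni := (PySem.Chars.findFrom_natCast_eq_neg_one_iff s ['N'] i (le_of_lt hi)).mp hf
      exact hni ((List.singleton_infix_iff 'N' _).mpr hx)
    · rw [List.drop_eq_nil_of_le (by omega)] at hx
      simp at hx
  rw [pvSpec_noN _ _ hnoN, pvSegApp s cur i h1, PySem.List.slice_from_natCast]
  by_cases hc : s.drop cur = [] <;> simp [hc]

theorem pvBreak_fuel (n : Nat) : ∀ (s : List Char) (i cur : Nat),
    s.length + 1 - i ≤ n → cur ≤ i → cur ≤ s.length →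
    pvBreakAux s i cur = pvSpec ((s.drop cur).take (i - cur)) (s.drop i) := by
  induction n with
  | zero =>
    intro s i cur hf h1 h2
    exact pvBreak_exit s i cur h1 (fun hg => by omega)
  | succ n ih =>
    intro s i cur hf h1 h2
    by_cases hg : i < s.length ∧ PySem.Chars.findFrom s ['N'] (i : Int) none ≠ -1
    · obtain ⟨hi, hfind⟩ := hg
      have hk : i ≤ s.length := le_of_lt hi
      obtain ⟨hge, hpre, hmin⟩ := PySem.Chars.findFrom_natCast_spec s ['N'] i hk hfind
      rw [pvBreakAux, dif_pos ⟨hi, hfind⟩]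
      dsimp only
      set st := (PySem.Chars.findFrom s ['N'] (i : Int) none).toNat with hst
      set e := pvNRunEnd s (st + 1) with he
      have hstge : i ≤ st := by omega
      have hstlt : st < s.length := by
        have hne : s.drop st ≠ [] := by
          intro h0
          rw [h0] at hpre
          simp at hpre
        by_contra hcon
        exact hne (List.drop_eq_nil_of_le (by omega))
      have hstN : s[st]? = some 'N' := by
        have hh := (pvPrefixSingleton _ _).mp hpre
        rwa [List.head?_drop] at hh
      have hele : e ≤ s.length := pvNRunEnd_le s (st + 1) (by omega)
      have hege : st + 1 ≤ e := pvNRunEnd_ge s (st + 1)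
      have heN : ∀ j, st ≤ j → j < e → s[j]? = some 'N' := by
        intro j hj1 hj2
        rcases Nat.eq_or_lt_of_le hj1 with heq | hlt
        · subst heq; exact hstN
        · exact pvNRunEnd_N s (st + 1) j hlt hj2
      have hestop := pvNRunEnd_stop s (st + 1) (by omega)
      have hrhead : (s.drop e).head? ≠ some 'N' := by
        rcases hestop with hEnd | ⟨hlt, hne⟩
        · rw [List.drop_eq_nil_of_le (by omega)]
          simp
        · rw [List.head?_drop]
          exact hne
      have hw : ∀ x ∈ (s.drop i).take (st - i), x ≠ 'N' := by
        intro x hx hxN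
        subst hxN
        obtain ⟨j, hj, hjx⟩ := List.getElem_of_mem hx
        have hjlt : j < st - i := lt_of_lt_of_le hj (by simpa using List.length_take_le _ _)
        have : s[i + j]? = some 'N' := by
          rw [List.getElem?_eq_getElem (by omega)]
          have := hjx
          simp [List.getElem_take, List.getElem_drop] at this
          rw [this]
        exact hmin (i + j) (by omega) (by omega)
          ((pvPrefixSingleton _ _).mpr (by rwa [List.head?_drop]))
      have hu : ∀ x ∈ (s.drop st).take (e - st), x = 'N' := by
        intro x hx
        obtain ⟨j, hj, hjx⟩ := List.getElem_of_mem hx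
        have hjlt : j < e - st := lt_of_lt_of_le hj (by simpa using List.length_take_le _ _)
        have hNj := heN (st + j) (by omega) (by omega)
        rw [List.getElem?_eq_getElem (by omega)] at hNj
        have hx' : x = s[st + j] := by
          rw [← hjx]
          simp [List.getElem_take, List.getElem_drop]
        rw [hx']
        exact Option.some.inj hNj
      have hulen : ((s.drop st).take (e - st)).length = e - st := by
        simp
        omega
      -- RHS reduction to position e
      have hstep1 : pvSpec ((s.drop cur).take (i - cur)) (s.drop i)
          = pvSpec ((s.drop cur).take (st - cur)) (s.drop st) := by
        calc pvSpec ((s.drop cur).take (i - cur)) (s.drop i)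
            = pvSpec ((s.drop cur).take (i - cur)) ((s.drop i).take (st - i) ++ s.drop st) := by
              rw [pvSegApp s i st hstge]
          _ = pvSpec ((s.drop cur).take (i - cur) ++ (s.drop i).take (st - i)) (s.drop st) :=
              pvSpec_step_chunk _ _ _ hw
          _ = pvSpec ((s.drop cur).take (st - cur)) (s.drop st) := by
              rw [pvSegTake s cur i st h1 hstge]
      by_cases hrun : 10 ≤ e - st
      · rw [if_pos hrun]
        have hstep2 : pvSpec ((s.drop cur).take (st - cur)) (s.drop st)
            = (if (s.drop cur).take (st - cur) = [] then []
               else [String.ofList ((s.drop cur).take (st - cur))]) ++ pvSpec [] (s.drop e) := by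
          calc pvSpec ((s.drop cur).take (st - cur)) (s.drop st)
              = pvSpec ((s.drop cur).take (st - cur)) ((s.drop st).take (e - st) ++ s.drop e) := by
                rw [pvSegApp s st e (by omega)]
            _ = _ := pvSpec_qualify _ _ _ hu (by omega) hrhead
        rw [hstep1, hstep2, ih s (e + 1) e (by omega) (by omega) (by omega)]
        have htail : pvSpec ((s.drop e).take (e + 1 - e)) (s.drop (e + 1)) = pvSpec [] (s.drop e) := by
          rcases hestop with hEnd | ⟨hlt, hne⟩
          · rw [List.drop_eq_nil_of_le (show s.length ≤ e by omega),
                List.drop_eq_nil_of_le (show s.length ≤ e + 1 by omega)]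
            simp
          · have hcons : s.drop e = s[e] :: s.drop (e + 1) := (List.getElem_cons_drop hlt).symm
            have hne' : s[e] ≠ 'N' := by
              intro hh
              exact hne (by rw [List.getElem?_eq_getElem hlt, hh])
            rw [hcons, pvSpec_step_nonN _ _ _ hne']
            congr 1
            rw [show e + 1 - e = 1 by omega, List.take_one]
            simp
        rw [htail]
        congr 1
        rw [PySem.List.slice_natCast]
        have hlen2 : ((s.drop cur).take (st - cur)).length = st - cur := by
          simp
          omega
        by_cases hc : cur = st
        · simp [hc]
        · have hne0 : (s.drop cur).take (st - cur) ≠ [] := by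
            intro h0
            rw [h0] at hlen2
            simp at hlen2
            omega
          simp [hc, hne0]
      · rw [if_neg hrun]
        have hstep2 : pvSpec ((s.drop cur).take (st - cur)) (s.drop st)
            = pvSpec ((s.drop cur).take (e - cur)) (s.drop e) := by
          calc pvSpec ((s.drop cur).take (st - cur)) (s.drop st)
              = pvSpec ((s.drop cur).take (st - cur)) ((s.drop st).take (e - st) ++ s.drop e) := by
                rw [pvSegApp s st e (by omega)]
            _ = pvSpec ((s.drop cur).take (st - cur) ++ (s.drop st).take (e - st)) (s.drop e) :=
                pvSpec_step_shortN _ _ _ hu (by omega) hrhead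
            _ = pvSpec ((s.drop cur).take (e - cur)) (s.drop e) := by
                rw [pvSegTake s cur st e (by omega) (by omega)]
        rw [hstep1, hstep2, ih s (e + 1) cur (by omega) (by omega) h2]
        rcases hestop with hEnd | ⟨hlt, hne⟩
        · have hd1 : s.drop e = [] := List.drop_eq_nil_of_le (by omega)
          have hd2 : s.drop (e + 1) = [] := List.drop_eq_nil_of_le (by omega)
          rw [hd1, hd2]
          have : (s.drop cur).take (e + 1 - cur) = (s.drop cur).take (e - cur) := by
            rw [List.take_of_length_le (by simp; omega), List.take_of_length_le (by simp; omega)]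
          rw [this]
        · have hcons : s.drop e = s[e] :: s.drop (e + 1) := (List.getElem_cons_drop hlt).symm
          have hne' : s[e] ≠ 'N' := by
            intro hh
            exact hne (by rw [List.getElem?_eq_getElem hlt, hh])
          rw [hcons, pvSpec_step_nonN _ _ _ hne']
          congr 1
          have hsing : (s.drop e).take (e + 1 - e) = [s[e]] := by
            rw [show e + 1 - e = 1 by omega, List.take_one, List.head?_drop,
              List.getElem?_eq_getElem hlt]
            rfl
          rw [← hsing, pvSegTake s cur e (e + 1) (by omega) (by omega)]
    · exact pvBreak_exit s i cur h1 hg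

theorem pvBreak_eq_spec (s : List Char) (i cur : Nat) (h1 : cur ≤ i) (h2 : cur ≤ s.length) :
    pvBreakAux s i cur = pvSpec ((s.drop cur).take (i - cur)) (s.drop i) :=
  pvBreak_fuel (s.length + 1) s i cur (by omega) h1 h2

-- ===== VERDICT (by name: the statement is the Claim_ definition above) =====
theorem break_scaffold_spec : Claim_equal_break_scaffold := by
  intro seq _
  unfold Spec_break_scaffold break_scaffold break_scaffold_alt
  rw [pvBreak_eq_spec seq.toList 0 0 (le_refl 0) (Nat.zero_le _), pvJoin_eq_spec]
  simp
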